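-- pv_equiv track=rewrite | github.com/SepShr/MLCSHE | process_logs.py | divide_results_into_intervals
-- ===== SOURCE A (Python) =====
-- def divide_results_into_intervals(results: dict, intervals: int = 10) -> dict:
--     """Returns a dictionary with the results divided into intervals.
--     The format of the returned dictionary is as follows:\n
--     {
--         'interval_1': {
--             'run_1': [fitness_values],
--             'run_2': [fitness_values],
--             ...
--         },
--         ...
--     }
--     """
--     divided_results = {f'interval_{i}': {} for i in range(1, intervals + 1)}
--     for run, cs_archive in results.items():
--         # Divide the cs_archive into intervals.
--         # Each interval contains members of previous intervals, as well as its interval's members.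
--         interval_step = len(cs_archive) // intervals
--         for i in range(1, intervals + 1):
--             divided_results[f'interval_{i}'][run] = cs_archive[(i - 1) *
--                                                                interval_step:i * interval_step]
--
--     # Add the members of previous intervals to the current interval.
--     for i in range(2, intervals + 1):
--         for run, cs_archive in divided_results[f'interval_{i}'].items():
--             divided_results[f'interval_{i}'][run] = [
--                 *divided_results[f'interval_{i-1}'][run], *cs_archive]
--
--     return divided_results
-- ===== SOURCE B (Python) =====
-- def divide_results_into_intervals(results: dict, intervals: int = 10) -> dict:
--     """Same cumulative-interval split, built directly: the union of the first i
--     disjoint slices of a run's archive is just its prefix archive[:i*step], so one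
--     nested comprehension replaces the two mutation passes."""
--     return {
--         f'interval_{i}': {run: cs_archive[:i * (len(cs_archive) // intervals)]
--                           for run, cs_archive in results.items()}
--         for i in range(1, intervals + 1)
--     }
-- ===== Notes on version B (the rewrite author's own statement) =====
-- stated objective: simpler
-- what changed: B replaces A's three mutation passes (seed empty dicts, fill disjoint slices, then a second cumulative concatenation pass) with a single nested comprehension that assigns each run's prefix slice cs_archive[:i*step] directly, since the union of the first i disjoint slices is exactly that prefix.
import Mathlib
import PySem

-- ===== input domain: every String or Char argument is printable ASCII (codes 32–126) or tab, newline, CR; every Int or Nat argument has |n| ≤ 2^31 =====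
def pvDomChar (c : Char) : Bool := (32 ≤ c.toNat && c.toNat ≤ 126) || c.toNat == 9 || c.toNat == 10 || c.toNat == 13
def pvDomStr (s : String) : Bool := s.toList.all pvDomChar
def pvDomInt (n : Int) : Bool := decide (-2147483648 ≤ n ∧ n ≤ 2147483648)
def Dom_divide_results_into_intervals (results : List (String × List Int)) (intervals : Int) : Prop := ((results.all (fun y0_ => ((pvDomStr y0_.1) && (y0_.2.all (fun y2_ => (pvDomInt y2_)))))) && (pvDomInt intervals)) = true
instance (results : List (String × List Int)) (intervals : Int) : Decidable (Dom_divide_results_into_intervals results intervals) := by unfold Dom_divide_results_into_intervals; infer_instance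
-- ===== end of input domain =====

-- B replaces A's three mutation passes by one nested comprehension assigning each run's
-- prefix slice directly (objective: simpler); same values on every admitted input.

-- ===== PORT A =====
-- f'interval_{i}'  (shared f-string helper of both Pythons)
def pvKey (i : Int) : String := "interval_" ++ PySem.Int.toStr i

-- literal port of A: seed {interval_i: {}}, fill the disjoint slices per run
-- (divided_results[k][run] = v on an always-present key k is Dict.modify; exact here),
-- then the cumulative pass prepending interval_{i-1}'s value (read from the live dict,
-- whose interval_{i-1} entry is unchanged during the inner loop, so the snapshot fold is exact;
-- the getD defaults are never used: every key/run looked up is present).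
def divide_results_into_intervals (results : List (String × List Int)) (intervals : Int) : List (String × List (String × List Int)) :=
  ((PySem.List.pyRange 2 (intervals + 1) 1).foldl
    (fun d i =>
      ((d.getD (pvKey i) PySem.Dict.empty).items).foldl
        (fun d' pr =>
          d'.modify (pvKey i) PySem.Dict.empty
            (fun inn => inn.insert pr.1
              ((d'.getD (pvKey (i - 1)) PySem.Dict.empty).getD pr.1 [] ++ pr.2)))
        d)
    (results.foldl
      (fun d pr =>
        let step := PySem.Int.floordiv (PySem.List.len pr.2) intervals
        (PySem.List.pyRange 1 (intervals + 1) 1).foldl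
          (fun d i =>
            d.modify (pvKey i) PySem.Dict.empty
              (fun inn => inn.insert pr.1
                (PySem.List.slice pr.2 (some ((i - 1) * step)) (some (i * step)))))
          d)
      ((PySem.List.pyRange 1 (intervals + 1) 1).foldl
        (fun d i => d.insert (pvKey i) PySem.Dict.empty) PySem.Dict.empty))).items.map
    (fun p => (p.1, p.2.items))

-- ===== PORT B =====
-- literal port of Source B: one nested comprehension, each entry a prefix slice
def divide_results_into_intervals_alt (results : List (String × List Int)) (intervals : Int) : List (String × List (String × List Int)) :=
  (PySem.List.pyRange 1 (intervals + 1) 1).map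
    (fun i =>
      (pvKey i,
        (results.foldl
          (fun inn pr =>
            inn.insert pr.1
              (PySem.List.slice pr.2 none
                (some (i * PySem.Int.floordiv (PySem.List.len pr.2) intervals))))
          PySem.Dict.empty).items))

-- ===== PRECONDITION & SPEC =====
-- results models a Python dict, whose keys are necessarily distinct: the Nodup conjunct
-- excludes only association lists no Python input produces.  intervals = 0 with non-empty
-- results is excluded because A raises ZeroDivisionError there.
def Pre_divide_results_into_intervals (results : List (String × List Int)) (intervals : Int) : Prop :=
  (results.map Prod.fst).Nodup ∧ (intervals ≠ 0 ∨ results = [])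
instance (results : List (String × List Int)) (intervals : Int) : Decidable (Pre_divide_results_into_intervals results intervals) := by unfold Pre_divide_results_into_intervals; infer_instance

def pvWitness_divide_results_into_intervals : (List (String × List Int)) × Int :=
  ([("run_1", [1, 2, 3, 4]), ("run_2", [5, 6])], 2)

def Spec_divide_results_into_intervals (results : List (String × List Int)) (intervals : Int) (out : List (String × List (String × List Int))) : Prop := out = divide_results_into_intervals_alt results intervals
instance (results : List (String × List Int)) (intervals : Int) (out : List (String × List (String × List Int))) : Decidable (Spec_divide_results_into_intervals results intervals out) := by unfold Spec_divide_results_into_intervals; infer_instance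

-- ===== CLAIM (what is proved, stated in full; the proofs are below) =====
def Claim_equal_divide_results_into_intervals : Prop := ∀ (results : List (String × List Int)) (intervals : Int), Dom_divide_results_into_intervals results intervals → Pre_divide_results_into_intervals results intervals → Spec_divide_results_into_intervals results intervals (divide_results_into_intervals results intervals)

-- ===== LEMMAS AND PROOFS =====

-- ---- pvKey is injective on positive arguments ----

lemma pvDigitCharInj : ∀ a, a < 10 → ∀ b, b < 10 → Nat.digitChar a = Nat.digitChar b → a = b := by decide

lemma pvToDigitsCoreEq : ∀ (m : Nat), 1 ≤ m → ∀ (fuel : Nat) (ds : List Char), m ≤ fuel →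
    Nat.toDigitsCore 10 (fuel + 1) m ds = ((Nat.digits 10 m).map Nat.digitChar).reverse ++ ds := by
  intro m
  induction m using Nat.strong_induction_on with
  | _ m ih =>
    intro hm fuel ds hfuel
    simp only [Nat.toDigitsCore]
    by_cases h0 : m / 10 = 0
    · rw [if_pos h0, Nat.digits_def' (n := m) (by norm_num : (1:ℕ) < 10) (by omega), h0, Nat.digits_zero]
      simp
    · have hlt : m / 10 < m := Nat.div_lt_self (by omega) (by norm_num)
      obtain ⟨fuel', rfl⟩ : ∃ f', fuel = f' + 1 := ⟨fuel - 1, by omega⟩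
      rw [if_neg h0, ih (m / 10) hlt (by omega) fuel' _ (by omega)]
      rw [Nat.digits_def' (n := m) (by norm_num : (1:ℕ) < 10) (by omega)]
      simp

lemma pvToDigitsEq (m : Nat) (hm : 1 ≤ m) :
    Nat.toDigits 10 m = ((Nat.digits 10 m).map Nat.digitChar).reverse := by
  have := pvToDigitsCoreEq m hm m [] le_rfl
  simpa [Nat.toDigits] using this

lemma pvMapDigitCharInj : ∀ (l1 l2 : List Nat), (∀ x ∈ l1, x < 10) → (∀ x ∈ l2, x < 10) →
    l1.map Nat.digitChar = l2.map Nat.digitChar → l1 = l2 := by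
  intro l1
  induction l1 with
  | nil => intro l2 _ _ h; cases l2 <;> simp_all
  | cons a t ih =>
    intro l2 h1 h2 h
    cases l2 with
    | nil => simp_all
    | cons b t2 =>
      simp only [List.map_cons, List.cons.injEq] at h
      have hab := pvDigitCharInj a (h1 a (by simp)) b (h2 b (by simp)) h.1
      subst hab
      rw [ih t2 (fun x hx => h1 x (by simp [hx])) (fun x hx => h2 x (by simp [hx])) h.2]

lemma pvToCharsInj {i j : Int} (hi : 1 ≤ i) (hj : 1 ≤ j)
    (h : PySem.Int.toChars i = PySem.Int.toChars j) : i = j := by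
  simp only [PySem.Int.toChars, if_neg (by omega : ¬ i < 0), if_neg (by omega : ¬ j < 0)] at h
  rw [pvToDigitsEq _ (by omega), pvToDigitsEq _ (by omega)] at h
  have h2 := List.reverse_injective h
  have h3 := pvMapDigitCharInj _ _ (fun x hx => Nat.digits_lt_base (by norm_num) hx)
      (fun x hx => Nat.digits_lt_base (by norm_num) hx) h2
  have h4 := congrArg (Nat.ofDigits 10) h3
  rw [Nat.ofDigits_digits, Nat.ofDigits_digits] at h4
  omega

lemma pvKeyInj {i j : Int} (hi : 1 ≤ i) (hj : 1 ≤ j) (h : pvKey i = pvKey j) : i = j := by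
  have h' := congrArg String.toList h
  simp only [pvKey, String.toList_append, PySem.Int.toList_toStr] at h'
  exact pvToCharsInj hi hj (List.append_cancel_left h')

lemma pvKeysNodup (n : Int) : ((PySem.List.pyRange 1 (n + 1) 1).map pvKey).Nodup :=
  List.Nodup.map_on
    (fun _ hx _ hy hxy =>
      pvKeyInj (PySem.List.mem_pyRange_one.mp hx).1 (PySem.List.mem_pyRange_one.mp hy).1 hxy)
    (PySem.List.nodup_pyRange_one 1 (n + 1))

-- ---- proof-side canonical forms ----

def pvStep (n : Int) (pr : String × List Int) : Int := PySem.Int.floordiv (PySem.List.len pr.2) n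
def pvSeg (n : Int) (pr : String × List Int) (i : Int) : List Int :=
  PySem.List.slice pr.2 (some ((i - 1) * pvStep n pr)) (some (i * pvStep n pr))
def pvPre (n : Int) (pr : String × List Int) (i : Int) : List Int :=
  PySem.List.slice pr.2 none (some (i * pvStep n pr))
def pvInn (rs : List (String × List Int)) (v : (String × List Int) → List Int) : PySem.Dict String (List Int) :=
  PySem.Dict.mk (rs.map (fun pr => (pr.1, v pr)))
def pvMkF (n : Int) (f : Int → PySem.Dict String (List Int)) : PySem.Dict String (PySem.Dict String (List Int)) :=
  PySem.Dict.mk ((PySem.List.pyRange 1 (n + 1) 1).map (fun i => (pvKey i, f i)))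

lemma pvMkF_keys (n : Int) (f : Int → PySem.Dict String (List Int)) :
    (pvMkF n f).keys = (PySem.List.pyRange 1 (n + 1) 1).map pvKey := by
  simp [pvMkF, PySem.Dict.keys, List.map_map, Function.comp]

lemma pvMkF_keys_nodup (n : Int) (f : Int → PySem.Dict String (List Int)) : (pvMkF n f).keys.Nodup := by
  rw [pvMkF_keys]; exact pvKeysNodup n

lemma pvGetD_mkF (n : Int) (f : Int → PySem.Dict String (List Int)) {i : Int}
    (hi : i ∈ PySem.List.pyRange 1 (n + 1) 1) (e : PySem.Dict String (List Int)) :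
    (pvMkF n f).getD (pvKey i) e = f i :=
  PySem.Dict.getD_of_mem_items (pvMkF n f)
    (show (pvKey i, f i) ∈ (pvMkF n f).items from List.mem_map_of_mem hi)
    (pvMkF_keys_nodup n f) e

lemma pvContains_mkF (n : Int) (f : Int → PySem.Dict String (List Int)) {i : Int}
    (hi : i ∈ PySem.List.pyRange 1 (n + 1) 1) :
    (pvMkF n f).contains (pvKey i) = true := by
  rw [PySem.Dict.contains_iff_mem_keys, pvMkF_keys]
  exact List.mem_map_of_mem hi

lemma pvMkF_congr {n : Int} {f f' : Int → PySem.Dict String (List Int)}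
    (h : ∀ j ∈ PySem.List.pyRange 1 (n + 1) 1, f j = f' j) : pvMkF n f = pvMkF n f' := by
  apply PySem.Dict.ext
  exact List.map_congr_left (fun i hi => by rw [h i hi])

lemma pvModify_mkF {n : Int} {f : Int → PySem.Dict String (List Int)} {i : Int}
    (hi : i ∈ PySem.List.pyRange 1 (n + 1) 1)
    (g : PySem.Dict String (List Int) → PySem.Dict String (List Int)) :
    (pvMkF n f).modify (pvKey i) PySem.Dict.empty g
      = pvMkF n (fun j => if j = i then g (f j) else f j) := by
  have h1 : 1 ≤ i := (PySem.List.mem_pyRange_one.mp hi).1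
  apply PySem.Dict.ext
  show ((pvMkF n f).insert (pvKey i) (g ((pvMkF n f).getD (pvKey i) PySem.Dict.empty))).items = _
  rw [pvGetD_mkF n f hi, PySem.Dict.items_insert_of_contains _ _ (pvContains_mkF n f hi)]
  show ((PySem.List.pyRange 1 (n + 1) 1).map (fun j => (pvKey j, f j))).map _ = _
  rw [List.map_map]
  apply List.map_congr_left
  intro j hj
  have hj1 : 1 ≤ j := (PySem.List.mem_pyRange_one.mp hj).1
  by_cases hji : j = i
  · subst hji; simp
  · have hne : pvKey j ≠ pvKey i := fun he => hji (pvKeyInj hj1 h1 he)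
    simp [Function.comp, hne, hji]

lemma pvFoldModify_mkF (n : Int) (g : Int → PySem.Dict String (List Int) → PySem.Dict String (List Int)) :
    ∀ (l : List Int) (f : Int → PySem.Dict String (List Int)), l.Nodup →
      (∀ i ∈ l, i ∈ PySem.List.pyRange 1 (n + 1) 1) →
      l.foldl (fun d i => d.modify (pvKey i) PySem.Dict.empty (g i)) (pvMkF n f)
        = pvMkF n (fun j => if j ∈ l then g j (f j) else f j) := by
  intro l
  induction l with
  | nil =>
    intro f _ _
    simp only [List.foldl_nil]
    exact pvMkF_congr (fun j hj => by simp)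
  | cons a t ih =>
    intro f hnd hsub
    rw [List.foldl_cons, pvModify_mkF (hsub a (List.mem_cons_self)) (g a),
      ih _ (List.nodup_cons.mp hnd).2 (fun i h => hsub i (List.mem_cons_of_mem _ h))]
    apply pvMkF_congr
    intro j hj
    by_cases hjt : j ∈ t
    · have hja : j ≠ a := fun h => (List.nodup_cons.mp hnd).1 (h ▸ hjt)
      simp [hjt, hja]
    · by_cases hja : j = a
      · subst hja; simp [hjt]
      · simp [hjt, hja]

lemma pvStage1 (n : Int) : ∀ (rs : List (String × List Int)) (f : Int → PySem.Dict String (List Int)),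
    rs.foldl
      (fun d pr =>
        let step := PySem.Int.floordiv (PySem.List.len pr.2) n
        (PySem.List.pyRange 1 (n + 1) 1).foldl
          (fun d i =>
            d.modify (pvKey i) PySem.Dict.empty
              (fun inn => inn.insert pr.1
                (PySem.List.slice pr.2 (some ((i - 1) * step)) (some (i * step)))))
          d)
      (pvMkF n f)
    = pvMkF n (fun i => rs.foldl (fun inn pr => inn.insert pr.1 (pvSeg n pr i)) (f i)) := by
  intro rs
  induction rs with
  | nil => intro f; rfl
  | cons pr t ih =>
    intro f
    simp only [List.foldl_cons]
    rw [pvFoldModify_mkF n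
        (fun i inn => inn.insert pr.1
          (PySem.List.slice pr.2 (some ((i - 1) * PySem.Int.floordiv (PySem.List.len pr.2) n))
            (some (i * PySem.Int.floordiv (PySem.List.len pr.2) n))))
        (PySem.List.pyRange 1 (n + 1) 1) f (PySem.List.nodup_pyRange_one _ _) (fun i h => h)]
    rw [ih]
    apply pvMkF_congr
    intro j hj
    simp [hj, pvSeg, pvStep]

lemma pvInn_eq_foldl (rs : List (String × List Int)) (hnd : (rs.map Prod.fst).Nodup)
    (v : (String × List Int) → List Int) :
    rs.foldl (fun inn pr => inn.insert pr.1 (v pr)) PySem.Dict.empty = pvInn rs v := by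
  apply PySem.Dict.ext
  rw [PySem.Dict.items_foldl_insert_fresh rs Prod.fst v PySem.Dict.empty
      (fun a _ => PySem.Dict.contains_empty _) hnd]
  simp [pvInn, PySem.Dict.empty]

lemma pvInn_keys (rs : List (String × List Int)) (v : (String × List Int) → List Int) :
    (pvInn rs v).keys = rs.map Prod.fst := by
  simp [pvInn, PySem.Dict.keys, List.map_map, Function.comp]

lemma pvGetD_pvInn (rs : List (String × List Int)) (hnd : (rs.map Prod.fst).Nodup)
    {pr : String × List Int} (h : pr ∈ rs) (v : (String × List Int) → List Int) (e : List Int) :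
    (pvInn rs v).getD pr.1 e = v pr :=
  PySem.Dict.getD_of_mem_items (pvInn rs v)
    (show (pr.1, v pr) ∈ (pvInn rs v).items from List.mem_map_of_mem h)
    (by rw [pvInn_keys]; exact hnd) e

lemma pvOverwrite (w u : (String × List Int) → List Int) :
    ∀ (t : List (String × List Int)) (pre : List (String × List Int)),
      (t.map Prod.fst).Nodup → (∀ p ∈ pre, ∀ q ∈ t, p.1 ≠ q.1) →
      t.foldl (fun inn pr => inn.insert pr.1 (w pr))
          (PySem.Dict.mk (pre ++ t.map (fun pr => (pr.1, u pr))))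
        = PySem.Dict.mk (pre ++ t.map (fun pr => (pr.1, w pr))) := by
  intro t
  induction t with
  | nil => intro pre _ _; simp
  | cons pr t ih =>
    intro pre hnd hdisj
    have hnd2 : pr.1 ∉ t.map Prod.fst ∧ (t.map Prod.fst).Nodup := by
      rw [List.map_cons] at hnd; exact List.nodup_cons.mp hnd
    rw [List.foldl_cons]
    have hc : (PySem.Dict.mk (pre ++ (pr :: t).map (fun q => (q.1, u q)))).contains pr.1 = true := by
      rw [PySem.Dict.contains_iff_mem_keys]
      simp [PySem.Dict.keys]
    have hins :
        (PySem.Dict.mk (pre ++ (pr :: t).map (fun q => (q.1, u q)))).insert pr.1 (w pr)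
          = PySem.Dict.mk ((pre ++ [(pr.1, w pr)]) ++ t.map (fun q => (q.1, u q))) := by
      apply PySem.Dict.ext
      rw [PySem.Dict.items_insert_of_contains _ _ hc]
      show (pre ++ (pr :: t).map (fun q => (q.1, u q))).map _ = _
      rw [List.map_cons, List.map_append, List.map_cons]
      have h1 : pre.map (fun p => if (p.1 == pr.1) = true then (pr.1, w pr) else p) = pre := by
        conv_rhs => rw [← List.map_id pre]
        apply List.map_congr_left
        intro p hp
        have hne : p.1 ≠ pr.1 := hdisj p hp pr List.mem_cons_self
        simp [hne]
      have h2 : (t.map (fun q => (q.1, u q))).map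
            (fun p => if (p.1 == pr.1) = true then (pr.1, w pr) else p)
          = t.map (fun q => (q.1, u q)) := by
        rw [List.map_map]
        conv_rhs => rw [← List.map_id (t.map (fun q => (q.1, u q))), List.map_map]
        apply List.map_congr_left
        intro q hq
        have hne : q.1 ≠ pr.1 := by
          intro he
          exact hnd2.1 (by rw [← he]; exact List.mem_map_of_mem hq)
        simp [Function.comp, hne]
      rw [h1, h2]
      simp
    rw [show PySem.Dict.mk (pre ++ (pr :: t).map (fun pr => (pr.1, u pr)))
        = PySem.Dict.mk (pre ++ (pr :: t).map (fun q => (q.1, u q))) from rfl, hins]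
    have hdisj' : ∀ p ∈ pre ++ [(pr.1, w pr)], ∀ q ∈ t, p.1 ≠ q.1 := by
      intro p hp q hq
      rcases List.mem_append.mp hp with hp | hp
      · exact hdisj p hp q (List.mem_cons_of_mem _ hq)
      · have hpe : p = (pr.1, w pr) := by simpa using hp
        subst hpe
        intro he
        exact hnd2.1 (by rw [he]; exact List.mem_map_of_mem hq)
    rw [ih (pre ++ [(pr.1, w pr)]) hnd2.2 hdisj']
    simp

lemma pvInner (n : Int) {i : Int} (hi : i ∈ PySem.List.pyRange 1 (n + 1) 1) (h2 : 2 ≤ i) :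
    ∀ (ps : List (String × List Int)) (f : Int → PySem.Dict String (List Int)),
      ps.foldl
        (fun d' pr =>
          d'.modify (pvKey i) PySem.Dict.empty
            (fun inn => inn.insert pr.1
              ((d'.getD (pvKey (i - 1)) PySem.Dict.empty).getD pr.1 [] ++ pr.2)))
        (pvMkF n f)
      = pvMkF n (fun j => if j = i then
          ps.foldl (fun inn pr => inn.insert pr.1 ((f (i - 1)).getD pr.1 [] ++ pr.2)) (f i)
        else f j) := by
  have hi1 : i - 1 ∈ PySem.List.pyRange 1 (n + 1) 1 := by
    have := PySem.List.mem_pyRange_one.mp hi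
    exact PySem.List.mem_pyRange_one.mpr ⟨by omega, by omega⟩
  intro ps
  induction ps with
  | nil =>
    intro f
    simp only [List.foldl_nil]
    exact (pvMkF_congr (fun j hj => by by_cases h : j = i <;> simp [h])).symm
  | cons pr ps ih =>
    intro f
    rw [List.foldl_cons, pvGetD_mkF n f hi1, pvModify_mkF hi]
    rw [ih]
    apply pvMkF_congr
    intro j hj
    by_cases hji : j = i
    · subst hji
      simp only [List.foldl_cons]
      have hne : ¬ (j - 1 = j) := by omega
      simp [hne]
    · simp [hji]

lemma pvStep_nonneg (n : Int) (hn : 0 < n) (pr : String × List Int) : 0 ≤ pvStep n pr := by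
  unfold pvStep
  rw [PySem.Int.floordiv_eq_ediv_of_pos hn]
  have h0 : (0:Int) ≤ PySem.List.len pr.2 := by
    simp [PySem.List.len_eq]
  exact Int.ediv_nonneg h0 (le_of_lt hn)

lemma pvConcat (n : Int) (hn : 0 < n) (pr : String × List Int) {m : Int} (hm : 1 ≤ m) :
    pvPre n pr (m - 1) ++ pvSeg n pr m = pvPre n pr m := by
  have hs := pvStep_nonneg n hn pr
  have h0 : 0 ≤ (m - 1) * pvStep n pr := mul_nonneg (by omega) hs
  have h1 : 0 ≤ m * pvStep n pr := mul_nonneg (by omega) hs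
  have hle : (m - 1) * pvStep n pr ≤ m * pvStep n pr := by nlinarith
  unfold pvPre pvSeg
  rw [PySem.List.slice_to pr.2 h0, PySem.List.slice_toNat pr.2 h0 h1, PySem.List.slice_to pr.2 h1]
  have hpq : ((m - 1) * pvStep n pr).toNat ≤ (m * pvStep n pr).toNat := Int.toNat_le_toNat hle
  rw [show (m * pvStep n pr).toNat
      = ((m - 1) * pvStep n pr).toNat + ((m * pvStep n pr).toNat - ((m - 1) * pvStep n pr).toNat) by omega,
    List.take_add]
  congr 2
  omega

lemma pvSeg_one (n : Int) (pr : String × List Int) : pvSeg n pr 1 = pvPre n pr 1 := by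
  simp [pvSeg, pvPre]

lemma pvStage2 (n : Int) (hn : 0 < n) (rs : List (String × List Int))
    (hnd : (rs.map Prod.fst).Nodup) :
    ∀ (k : Nat) (m : Int), 2 ≤ m → (n + 1 - m).toNat = k →
      (PySem.List.pyRange m (n + 1) 1).foldl
        (fun d i =>
          ((d.getD (pvKey i) PySem.Dict.empty).items).foldl
            (fun d' pr =>
              d'.modify (pvKey i) PySem.Dict.empty
                (fun inn => inn.insert pr.1
                  ((d'.getD (pvKey (i - 1)) PySem.Dict.empty).getD pr.1 [] ++ pr.2)))
            d)
        (pvMkF n (fun j => if j < m then pvInn rs (fun pr => pvPre n pr j)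
                           else pvInn rs (fun pr => pvSeg n pr j)))
      = pvMkF n (fun j => pvInn rs (fun pr => pvPre n pr j)) := by
  intro k
  induction k with
  | zero =>
    intro m hm hk
    rw [PySem.List.pyRange_one_eq_nil (by omega), List.foldl_nil]
    apply pvMkF_congr
    intro j hj
    have := PySem.List.mem_pyRange_one.mp hj
    rw [if_pos (by omega)]
  | succ k ihk =>
    intro m hm hk
    have hmn : m < n + 1 := by omega
    have hmR : m ∈ PySem.List.pyRange 1 (n + 1) 1 := PySem.List.mem_pyRange_one.mpr ⟨by omega, hmn⟩
    rw [PySem.List.pyRange_one_cons hmn]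
    simp only [List.foldl_cons]
    rw [pvGetD_mkF n _ hmR]
    rw [show (if m < m then pvInn rs (fun pr => pvPre n pr m) else pvInn rs (fun pr => pvSeg n pr m))
        = pvInn rs (fun pr => pvSeg n pr m) from if_neg (by omega)]
    show (PySem.List.pyRange (m + 1) (n + 1) 1).foldl _
        ((rs.map (fun pr => (pr.1, pvSeg n pr m))).foldl _ _) = _
    rw [pvInner n hmR hm]
    have hm1 : (if m - 1 < m then pvInn rs (fun pr => pvPre n pr (m - 1))
        else pvInn rs (fun pr => pvSeg n pr (m - 1))) = pvInn rs (fun pr => pvPre n pr (m - 1)) :=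
      if_pos (by omega)
    have hmm : (if m < m then pvInn rs (fun pr => pvPre n pr m)
        else pvInn rs (fun pr => pvSeg n pr m)) = pvInn rs (fun pr => pvSeg n pr m) :=
      if_neg (by omega)
    rw [hm1, hmm, List.foldl_map]
    rw [PySem.List.foldl_congr_mem rs _
        (fun inn pr => inn.insert pr.1 (pvPre n pr (m - 1) ++ pvSeg n pr m)) _
        (fun acc pr hpr => by rw [pvGetD_pvInn rs hnd hpr])]
    have hov := pvOverwrite (fun pr => pvPre n pr (m - 1) ++ pvSeg n pr m)
        (fun pr => pvSeg n pr m) rs [] hnd (by simp)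
    simp only [List.nil_append] at hov
    rw [show pvInn rs (fun pr => pvSeg n pr m)
        = PySem.Dict.mk (rs.map (fun pr => (pr.1, pvSeg n pr m))) from rfl, hov]
    rw [show PySem.Dict.mk (rs.map (fun pr => (pr.1, pvPre n pr (m - 1) ++ pvSeg n pr m)))
        = pvInn rs (fun pr => pvPre n pr m) from by
      unfold pvInn
      exact congrArg _ (List.map_congr_left (fun pr _ => by
        show (pr.1, pvPre n pr (m - 1) ++ pvSeg n pr m) = (pr.1, pvPre n pr m)
        rw [pvConcat n hn pr (show (1:Int) ≤ m by omega)]))]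
    have hstep : pvMkF n (fun j => if j = m then pvInn rs (fun pr => pvPre n pr m)
          else if j < m then pvInn rs (fun pr => pvPre n pr j) else pvInn rs (fun pr => pvSeg n pr j))
        = pvMkF n (fun j => if j < m + 1 then pvInn rs (fun pr => pvPre n pr j)
          else pvInn rs (fun pr => pvSeg n pr j)) := by
      apply pvMkF_congr
      intro j hj
      by_cases hje : j = m
      · subst hje; simp
      · by_cases hjl : j < m
        · rw [if_neg hje, if_pos hjl, if_pos (show j < m + 1 by omega)]
        · rw [if_neg hje, if_neg hjl, if_neg (show ¬ j < m + 1 by omega)]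
    rw [hstep]
    exact ihk (m + 1) (by omega) (by omega)

-- ===== VERDICT (by name: the statement is the Claim_ definition above) =====
theorem divide_results_into_intervals_spec : Claim_equal_divide_results_into_intervals := by
  unfold Claim_equal_divide_results_into_intervals Spec_divide_results_into_intervals
  intro rs n _ hpre
  obtain ⟨hnd, hor⟩ := hpre
  by_cases hn : 0 < n
  · -- positive intervals: both sides collapse to the prefix-slice map
    have hseed : (PySem.List.pyRange 1 (n + 1) 1).foldl
        (fun d i => d.insert (pvKey i) PySem.Dict.empty) PySem.Dict.empty
        = pvMkF n (fun _ => PySem.Dict.empty) := by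
      apply PySem.Dict.ext
      rw [PySem.Dict.items_foldl_insert_fresh _ pvKey (fun _ => PySem.Dict.empty) _
          (fun a _ => PySem.Dict.contains_empty _) (pvKeysNodup n)]
      simp [pvMkF, PySem.Dict.empty]
    unfold divide_results_into_intervals divide_results_into_intervals_alt
    rw [hseed, pvStage1 n rs (fun _ => PySem.Dict.empty)]
    have hmid : pvMkF n (fun i => rs.foldl (fun inn pr => inn.insert pr.1 (pvSeg n pr i)) PySem.Dict.empty)
        = pvMkF n (fun j => if j < 2 then pvInn rs (fun pr => pvPre n pr j)
                            else pvInn rs (fun pr => pvSeg n pr j)) := by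
      apply pvMkF_congr
      intro j hj
      have hj' := PySem.List.mem_pyRange_one.mp hj
      rw [pvInn_eq_foldl rs hnd]
      by_cases h2 : j < 2
      · have hj1 : j = 1 := by omega
        subst hj1
        rw [if_pos h2]
        unfold pvInn
        exact congrArg _ (List.map_congr_left (fun pr _ => by
          show (pr.1, pvSeg n pr 1) = (pr.1, pvPre n pr 1)
          rw [pvSeg_one]))
      · rw [if_neg h2]
    rw [hmid, pvStage2 n hn rs hnd (n - 1).toNat 2 (by omega) (by omega)]
    show (pvMkF n (fun j => pvInn rs (fun pr => pvPre n pr j))).items.map (fun p => (p.1, p.2.items)) = _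
    show ((PySem.List.pyRange 1 (n + 1) 1).map (fun i => (pvKey i, pvInn rs (fun pr => pvPre n pr i)))).map
        (fun p => (p.1, p.2.items)) = _
    rw [List.map_map]
    apply List.map_congr_left
    intro i hi
    simp only [Function.comp]
    rw [show (rs.foldl (fun inn pr => inn.insert pr.1
          (PySem.List.slice pr.2 none (some (i * PySem.Int.floordiv (PySem.List.len pr.2) n))))
          PySem.Dict.empty)
        = rs.foldl (fun inn pr => inn.insert pr.1 (pvPre n pr i)) PySem.Dict.empty from rfl,
      pvInn_eq_foldl rs hnd]
  · -- non-positive intervals: every range is empty, both sides are []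
    have h1 : PySem.List.pyRange 1 (n + 1) 1 = [] := PySem.List.pyRange_one_eq_nil (by omega)
    have h2 : PySem.List.pyRange 2 (n + 1) 1 = [] := PySem.List.pyRange_one_eq_nil (by omega)
    unfold divide_results_into_intervals divide_results_into_intervals_alt
    simp [h1, h2, PySem.Dict.empty]
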